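-- pv_equiv track=rewrite | github.com/fengyu586/Leetcode | Dynamic Programming/413. Arithmetic Slices.py | numberOfArithmeticSlices1
-- ===== SOURCE A (Python) =====
-- def numberOfArithmeticSlices1(A):         # 暴力法
--     n = len(A)
--     count = 0
--     for i in range(n - 2):
--         d = A[i + 1] - A[i]
--         for j in range(i + 2, n):
--             for k in range(j, n):
--                 if A[k] - A[k - 1] != d:
--                     break
--                 else:
--                     count += 1
--             break
--     return count
-- ===== SOURCE B (Python) =====
-- def numberOfArithmeticSlices1(A):
--     total = 0
--     cur = 0
--     for x, y, z in zip(A, A[1:], A[2:]):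
--         if z - y == y - x:
--             cur += 1
--             total += cur
--         else:
--             cur = 0
--     return total
-- ===== Notes on version B (the rewrite author's own statement) =====
-- stated objective: faster
-- what changed: Replaced the brute-force double scan (for each start index, rescan the whole arithmetic run) by the standard one-pass DP over consecutive triples that keeps a running count of the current arithmetic run and adds it to a total.
import Mathlib
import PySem

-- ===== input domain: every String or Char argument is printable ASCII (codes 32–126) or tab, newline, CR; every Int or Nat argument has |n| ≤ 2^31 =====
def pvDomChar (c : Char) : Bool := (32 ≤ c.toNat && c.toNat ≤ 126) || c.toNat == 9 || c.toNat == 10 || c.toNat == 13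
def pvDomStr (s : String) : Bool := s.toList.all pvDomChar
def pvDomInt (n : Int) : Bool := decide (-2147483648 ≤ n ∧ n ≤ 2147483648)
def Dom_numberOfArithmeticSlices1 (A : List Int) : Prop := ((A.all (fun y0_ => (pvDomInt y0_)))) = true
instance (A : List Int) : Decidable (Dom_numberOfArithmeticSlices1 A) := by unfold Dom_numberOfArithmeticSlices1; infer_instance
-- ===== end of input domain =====

-- B replaces A's quadratic brute force (for each start index, rescan the arithmetic run) by the
-- one-pass DP over consecutive triples (running count of run length, added to a total); objective: faster.

-- ===== PORT A =====
-- inner loop 'for k in range(j, n): if A[k] - A[k-1] != d: break else: count += 1'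
def pvKLoopA (A : List Int) (d : Int) : List Int → Int → Int
  | [], count => count
  | k :: ks, count =>
      if PySem.List.pyGetD A k 0 - PySem.List.pyGetD A (k - 1) 0 ≠ d then count
      else pvKLoopA A d ks (count + 1)

-- literal port of A; the middle 'for j in range(i+2, n)' breaks unconditionally after its first
-- iteration, so it is the match on the (possibly empty) range below, running the k-loop at j
def numberOfArithmeticSlices1 (A : List Int) : Int :=
  (PySem.List.pyRange 0 ((A.length : Int) - 2) 1).foldl
    (fun count i =>
      match PySem.List.pyRange (i + 2) (A.length : Int) 1 with
      | [] => count
      | j :: _ =>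
          pvKLoopA A (PySem.List.pyGetD A (i + 1) 0 - PySem.List.pyGetD A i 0)
            (PySem.List.pyRange j (A.length : Int) 1) count)
    0

-- ===== PORT B =====
-- for x, y, z in zip(A, A[1:], A[2:]): …  with state (cur, total), returning total
def numberOfArithmeticSlices1_alt (A : List Int) : Int :=
  (((A.zip (PySem.List.slice A (some 1) none)).zip (PySem.List.slice A (some 2) none)).foldl
    (fun (s : Int × Int) t =>
      if t.2 - t.1.2 = t.1.2 - t.1.1 then (s.1 + 1, s.2 + s.1 + 1) else (0, s.2))
    (0, 0)).2

-- ===== PRECONDITION & SPEC =====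
def Spec_numberOfArithmeticSlices1 (A : List Int) (out : Int) : Prop := out = numberOfArithmeticSlices1_alt A
instance (A : List Int) (out : Int) : Decidable (Spec_numberOfArithmeticSlices1 A out) := by unfold Spec_numberOfArithmeticSlices1; infer_instance

-- ===== CLAIM (what is proved, stated in full; the proofs are below) =====
def Claim_equal_numberOfArithmeticSlices1 : Prop := ∀ (A : List Int), Dom_numberOfArithmeticSlices1 A → Spec_numberOfArithmeticSlices1 A (numberOfArithmeticSlices1 A)

-- ===== LEMMAS AND PROOFS =====

-- length of the arithmetic-run prefix of l continuing after b with common difference d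
def pvExt (d : Int) : Int → List Int → Int
  | _, [] => 0
  | b, c :: t => if c - b = d then 1 + pvExt d c t else 0

-- canonical value both programs compute: sum over suffixes of the run length starting there
def pvSumExt : List Int → Int
  | a :: b :: t => pvExt (b - a) b t + pvSumExt (b :: t)
  | _ => 0

-- the k-loop's count accumulator is pure addition
lemma pvKLoopA_add (A : List Int) (d : Int) (ks : List Int) (c : Int) :
    pvKLoopA A d ks c = c + pvKLoopA A d ks 0 := by
  induction ks generalizing c with
  | nil => simp [pvKLoopA]
  | cons k ks ih =>
    simp only [pvKLoopA]
    split_ifs with h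
    · simp
    · rw [ih (c + 1), ih (0 + 1)]; ring

-- the k-loop starting at index j counts the run-prefix length of the suffix A.drop j
lemma pvKLoopA_ext (A : List Int) (d : Int) (l : List Int) :
    ∀ (j : Nat), 1 ≤ j → A.drop j = l →
      pvKLoopA A d (PySem.List.pyRange (j : Int) (A.length : Int) 1) 0
        = pvExt d (A.getD (j - 1) 0) l := by
  induction l generalizing d with
  | nil =>
    intro j hj hdrop
    have hlen : A.length ≤ j := by
      by_contra h
      have := List.drop_eq_nil_iff.mp hdrop
      omega
    rw [PySem.List.pyRange_one_eq_nil (by exact_mod_cast hlen)]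
    simp [pvKLoopA, pvExt]
  | cons c l ih =>
    intro j hj hdrop
    have hjlt : j < A.length := by
      by_contra h
      rw [List.drop_eq_nil_iff.mpr (by omega)] at hdrop
      simp at hdrop
    have hc : A.getD j 0 = c := by
      have h0 : A[j]? = some c := by
        have h1 : (A.drop j)[0]? = A[j + 0]? := List.getElem?_drop
        rw [hdrop] at h1
        simpa using h1.symm
      rw [List.getD_eq_getElem?_getD, h0]
      rfl
    have hdrop' : A.drop (j + 1) = l := by
      have : (A.drop j).tail = l := by rw [hdrop]; rfl
      simpa [List.tail_drop] using this
    rw [PySem.List.pyRange_one_cons (by exact_mod_cast hjlt)]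
    simp only [pvKLoopA]
    have hget : PySem.List.pyGetD A (j : Int) 0 = c := by
      rw [PySem.List.pyGetD_natCast, hc]
    have hget' : PySem.List.pyGetD A ((j : Int) - 1) 0 = A.getD (j - 1) 0 := by
      have : ((j : Int) - 1) = ((j - 1 : Nat) : Int) := by omega
      rw [this]; simp
    rw [hget, hget']
    have hru : pvExt d (A.getD (j - 1) 0) (c :: l) = if c - A.getD (j - 1) 0 = d then 1 + pvExt d c l else 0 := rfl
    rw [hru]
    by_cases h : c - A.getD (j - 1) 0 = d
    · rw [if_pos h, if_neg (not_not_intro h)]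
      rw [pvKLoopA_add, show ((j : Int) + 1) = ((j + 1 : Nat) : Int) by push_cast; ring,
        ih d (j + 1) (by omega) hdrop']
      rw [show j + 1 - 1 = j from rfl, hc]
      ring
    · rw [if_neg h, if_pos h]

-- A's contribution at outer index i
def pvExtAt (A : List Int) (i : Nat) : Int :=
  pvExt (A.getD (i + 1) 0 - A.getD i 0) (A.getD (i + 1) 0) (A.drop (i + 2))

lemma pvExtAt_cons (a : Int) (l : List Int) (i : Nat) : pvExtAt (a :: l) (i + 1) = pvExtAt l i := by
  simp [pvExtAt]

lemma pvSum_extAt (A : List Int) :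
    ((List.range (A.length - 2)).map (pvExtAt A)).sum = pvSumExt A := by
  induction A with
  | nil => simp [pvSumExt]
  | cons a l ih =>
    match l with
    | [] => simp [pvSumExt]
    | [b] => simp [pvSumExt, pvExt]
    | b :: c :: t =>
      have hlen : (a :: b :: c :: t).length - 2 = t.length + 1 := by simp
      rw [hlen, List.range_succ_eq_map, List.map_cons, List.map_map, List.sum_cons]
      have hshift : (List.range t.length).map (pvExtAt (a :: b :: c :: t) ∘ Nat.succ)
          = (List.range t.length).map (pvExtAt (b :: c :: t)) := by
        apply List.map_congr_left
        intro i _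
        exact pvExtAt_cons a (b :: c :: t) i
      rw [hshift]
      have hlen2 : (b :: c :: t).length - 2 = t.length := by simp
      rw [hlen2] at ih
      rw [ih]
      have h0 : pvExtAt (a :: b :: c :: t) 0 = pvExt (b - a) b (c :: t) := rfl
      rw [h0]
      rfl

lemma pvA_eq_sumExt (A : List Int) : numberOfArithmeticSlices1 A = pvSumExt A := by
  unfold numberOfArithmeticSlices1
  rw [PySem.List.pyRange_one, List.foldl_map]
  rw [PySem.List.foldl_congr_mem _ _
      (fun (count : Int) (k : Nat) => count + pvExtAt A k) 0 ?agree]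
  · rw [PySem.List.foldl_add]
    rw [show ((A.length : Int) - 2 - 0).toNat = A.length - 2 by omega]
    rw [pvSum_extAt]
    ring
  case agree =>
    intro c k hk
    have hk' : k < A.length - 2 := by
      have := List.mem_range.mp hk
      omega
    have hklen : (k : Int) + 2 < (A.length : Int) := by omega
    simp only [zero_add]
    rw [PySem.List.pyRange_one_cons (by omega : (k : Int) + 2 < (A.length : Int))]
    show pvKLoopA A (PySem.List.pyGetD A ((k : Int) + 1) 0 - PySem.List.pyGetD A (k : Int) 0)
        (PySem.List.pyRange ((k : Int) + 2) (A.length : Int) 1) c = c + pvExtAt A k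
    rw [pvKLoopA_add]
    rw [show ((k : Int) + 2) = ((k + 2 : Nat) : Int) by push_cast; ring]
    rw [pvKLoopA_ext A _ (A.drop (k + 2)) (k + 2) (by omega) rfl]
    rw [show ((k : Int) + 1) = ((k + 1 : Nat) : Int) by push_cast; ring,
        PySem.List.pyGetD_natCast, PySem.List.pyGetD_natCast]
    rfl

def pvTrip (l : List Int) : List ((Int × Int) × Int) := (l.zip (l.drop 1)).zip (l.drop 2)

lemma pvTrip_cons (a b c : Int) (t : List Int) :
    pvTrip (a :: b :: c :: t) = ((a, b), c) :: pvTrip (b :: c :: t) := rfl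

-- B's loop invariant: cur counts the run ending at the current triple
lemma pvB_inv (t : List Int) : ∀ (a b cur tot : Int),
    ((pvTrip (a :: b :: t)).foldl
      (fun (s : Int × Int) t =>
        if t.2 - t.1.2 = t.1.2 - t.1.1 then (s.1 + 1, s.2 + s.1 + 1) else (0, s.2))
      (cur, tot)).2 = tot + cur * pvExt (b - a) b t + pvSumExt (a :: b :: t) := by
  induction t with
  | nil => intro a b cur tot; simp [pvTrip, pvSumExt, pvExt]
  | cons c t ih =>
    intro a b cur tot
    rw [pvTrip_cons, List.foldl_cons]
    by_cases h : c - b = b - a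
    · rw [if_pos h]
      rw [ih b c (cur + 1) (tot + cur + 1)]
      have h1 : pvExt (b - a) b (c :: t) = 1 + pvExt (c - b) c t := by
        rw [pvExt, if_pos h, h]
      have h2 : pvSumExt (a :: b :: c :: t) = pvExt (b - a) b (c :: t) + pvSumExt (b :: c :: t) := rfl
      have h3 : pvSumExt (b :: c :: t) = pvExt (c - b) c t + pvSumExt (c :: t) := rfl
      rw [h2, h1, h3]
      ring
    · rw [if_neg h]
      rw [ih b c 0 tot]
      have h1 : pvExt (b - a) b (c :: t) = 0 := by rw [pvExt, if_neg h]
      have h2 : pvSumExt (a :: b :: c :: t) = pvExt (b - a) b (c :: t) + pvSumExt (b :: c :: t) := rfl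
      rw [h2, h1]
      ring

lemma pvB_eq_sumExt (A : List Int) : numberOfArithmeticSlices1_alt A = pvSumExt A := by
  unfold numberOfArithmeticSlices1_alt
  rw [show PySem.List.slice A (some 1) none = A.drop 1 from by simp [pysem],
     show PySem.List.slice A (some 2) none = A.drop 2 from by simp [pysem]]
  match A with
  | [] => rfl
  | [a] => rfl
  | a :: b :: t =>
    have := pvB_inv t a b 0 0
    simp only [pvTrip] at this
    norm_num at this ⊢
    rw [this]

-- ===== VERDICT (by name: the statement is the Claim_ definition above) =====
theorem numberOfArithmeticSlices1_spec : Claim_equal_numberOfArithmeticSlices1 := by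
  intro A _
  show numberOfArithmeticSlices1 A = numberOfArithmeticSlices1_alt A
  rw [pvA_eq_sumExt, pvB_eq_sumExt]
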